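-- pv_equiv track=rewrite | github.com/HYUNMIN-KIM/flask_start | pattern_matcher/sentence_pattern_matcher.py | backward_match
-- ===== SOURCE A (Python) =====
-- def backward_match(sentence, postfix_list, str_array):
--     ret_list = []
--     if postfix_list is None:
--         for str_unit in str_array:
--             if sentence.endswith(str_unit):
--                 ret_list.append(str_unit)
--     else:
--         for postfix in postfix_list:
--             for str_unit in str_array:
--                 merged_str = str_unit + postfix
--                 if sentence.endswith(merged_str):
--                     ret_list.append(merged_str)
--     return ret_list
-- ===== SOURCE B (Python) =====
-- def backward_match(sentence, postfix_list, str_array):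
--     if postfix_list is None:
--         return [str_unit for str_unit in str_array if sentence.endswith(str_unit)]
--     ret_list = []
--     for postfix in postfix_list:
--         if not sentence.endswith(postfix):
--             continue
--         prefix = sentence[:len(sentence) - len(postfix)]
--         ret_list.extend(str_unit + postfix for str_unit in str_array
--                         if prefix.endswith(str_unit))
--     return ret_list
-- ===== Notes on version B (the rewrite author's own statement) =====
-- stated objective: alternative
-- what changed: B tests each postfix once against the sentence and skips the whole inner scan when it does not match; when it does, it trims the postfix off once and tests each str_unit against the trimmed prefix, instead of rebuilding and re-testing str_unit+postfix against the full sentence for every pair.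
import Mathlib
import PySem

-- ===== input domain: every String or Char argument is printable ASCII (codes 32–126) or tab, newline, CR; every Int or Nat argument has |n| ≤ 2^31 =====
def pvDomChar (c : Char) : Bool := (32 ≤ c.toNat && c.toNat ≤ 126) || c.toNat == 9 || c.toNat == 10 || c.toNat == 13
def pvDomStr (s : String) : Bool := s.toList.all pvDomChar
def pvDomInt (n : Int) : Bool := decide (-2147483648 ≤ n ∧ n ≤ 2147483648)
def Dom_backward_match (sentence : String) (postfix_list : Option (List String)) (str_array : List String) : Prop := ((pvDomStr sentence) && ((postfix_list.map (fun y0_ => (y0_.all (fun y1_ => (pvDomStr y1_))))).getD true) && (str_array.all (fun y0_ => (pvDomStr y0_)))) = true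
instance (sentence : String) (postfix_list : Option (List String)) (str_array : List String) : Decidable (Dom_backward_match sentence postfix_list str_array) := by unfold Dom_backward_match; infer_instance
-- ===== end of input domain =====

-- B tests each postfix once against the sentence, and only on a match trims it off and
-- tests each str_unit against the trimmed prefix (alternative decomposition, same results).

-- ===== PORT A =====
def backward_match (sentence : String) (postfix_list : Option (List String)) (str_array : List String) : List String :=
  match postfix_list with
  | none =>
      str_array.foldl (fun ret_list str_unit =>
        if PySem.Str.endswith sentence str_unit then ret_list ++ [str_unit] else ret_list) []
  | some pl =>
      pl.foldl (fun ret_list pfx =>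
        str_array.foldl (fun ret_list str_unit =>
          let merged_str := str_unit ++ pfx
          if PySem.Str.endswith sentence merged_str then ret_list ++ [merged_str] else ret_list) ret_list) []

-- ===== PORT B =====
def backward_match_alt (sentence : String) (postfix_list : Option (List String)) (str_array : List String) : List String :=
  match postfix_list with
  | none => str_array.filter (fun str_unit => PySem.Str.endswith sentence str_unit)
  | some pl =>
      pl.foldl (fun ret_list pfx =>
        if !PySem.Str.endswith sentence pfx then ret_list
        else
          let prefx := PySem.Str.slice sentence none (some (PySem.Str.len sentence - PySem.Str.len pfx))
          ret_list ++ (str_array.filter (fun str_unit => PySem.Str.endswith prefx str_unit)).map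
            (fun str_unit => str_unit ++ pfx)) []

-- ===== PRECONDITION & SPEC =====
def Spec_backward_match (sentence : String) (postfix_list : Option (List String)) (str_array : List String) (out : List String) : Prop := out = backward_match_alt sentence postfix_list str_array
instance (sentence : String) (postfix_list : Option (List String)) (str_array : List String) (out : List String) : Decidable (Spec_backward_match sentence postfix_list str_array out) := by unfold Spec_backward_match; infer_instance

-- ===== CLAIM (what is proved, stated in full; the proofs are below) =====
def Claim_equal_backward_match : Prop := ∀ (sentence : String) (postfix_list : Option (List String)) (str_array : List String), Dom_backward_match sentence postfix_list str_array → Spec_backward_match sentence postfix_list str_array (backward_match sentence postfix_list str_array)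

-- ===== LEMMAS AND PROOFS =====

-- If p is not a suffix of s, neither is u ++ p.
theorem endswith_append_false (s u p : List Char) (h : ¬ p <:+ s) :
    PySem.Chars.endswith s (u ++ p) = false := by
  rw [Bool.eq_false_iff]
  intro hc
  exact h ((List.suffix_append u p).trans ((PySem.Chars.endswith_iff s (u ++ p)).mp hc))

-- If p is a suffix of s, then u ++ p is a suffix of s iff u is a suffix of the trimmed prefix.
theorem endswith_append_trim (s u p : List Char) (h : p <:+ s) :
    PySem.Chars.endswith s (u ++ p) = PySem.Chars.endswith (s.take (s.length - p.length)) u := by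
  obtain ⟨t, ht⟩ := h
  subst ht
  have hlen : (t ++ p).length - p.length = t.length := by simp
  rw [hlen, List.take_left]
  by_cases hu : u <:+ t
  · obtain ⟨r, hr⟩ := hu
    have h1 : PySem.Chars.endswith (t ++ p) (u ++ p) = true := by
      rw [PySem.Chars.endswith_iff]
      exact ⟨r, by rw [← List.append_assoc, hr]⟩
    have h2 : PySem.Chars.endswith t u = true := by
      rw [PySem.Chars.endswith_iff]; exact ⟨r, hr⟩
    rw [h1, h2]
  · have h1 : PySem.Chars.endswith (t ++ p) (u ++ p) = false := by
      rw [Bool.eq_false_iff]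
      intro hc
      obtain ⟨r, hr⟩ := (PySem.Chars.endswith_iff _ _).mp hc
      rw [← List.append_assoc] at hr
      exact hu ⟨r, List.append_cancel_right hr⟩
    have h2 : PySem.Chars.endswith t u = false := by
      rw [Bool.eq_false_iff]; intro hc; exact hu ((PySem.Chars.endswith_iff _ _).mp hc)
    rw [h1, h2]

-- the inner loop of A equals the guarded, trimmed body of B, for each individual postfix
theorem inner_step_eq (sentence pfx : String) (str_array : List String) (acc : List String) :
    str_array.foldl (fun ret_list str_unit =>
        if PySem.Str.endswith sentence (str_unit ++ pfx) then ret_list ++ [str_unit ++ pfx] else ret_list) acc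
    = if !PySem.Str.endswith sentence pfx then acc
      else acc ++ (str_array.filter (fun str_unit =>
              PySem.Str.endswith (PySem.Str.slice sentence none (some (PySem.Str.len sentence - PySem.Str.len pfx))) str_unit)).map
            (fun str_unit => str_unit ++ pfx) := by
  by_cases hp : PySem.Str.endswith sentence pfx = true
  · rw [hp]
    simp only [Bool.not_true, Bool.false_eq_true, if_false]
    rw [PySem.List.foldl_append_if
      (fun str_unit => PySem.Str.endswith sentence (str_unit ++ pfx))
      (fun str_unit => str_unit ++ pfx)]
    have hsuf : pfx.toList <:+ sentence.toList := by
      have hp' : PySem.Chars.endswith sentence.toList pfx.toList = true := by simpa using hp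
      exact (PySem.Chars.endswith_iff _ _).mp hp'
    congr 2
    apply List.filter_congr
    intro u _
    have key := endswith_append_trim sentence.toList u.toList pfx.toList hsuf
    have hslice : (PySem.Str.slice sentence none (some (PySem.Str.len sentence - PySem.Str.len pfx))).toList
        = sentence.toList.take (sentence.toList.length - pfx.toList.length) := by
      rw [PySem.Str.toList_slice, PySem.Chars.slice_eq_listSlice]
      have hle : pfx.toList.length ≤ sentence.toList.length := hsuf.length_le
      have hlen : PySem.Str.len sentence - PySem.Str.len pfx
          = ((sentence.toList.length - pfx.toList.length : Nat) : Int) := by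
        simp [PySem.Str.len, -String.length_toList]
        omega
      rw [hlen, PySem.List.slice_to_natCast]
    calc PySem.Str.endswith sentence (u ++ pfx)
        = PySem.Chars.endswith sentence.toList (u.toList ++ pfx.toList) := by simp
      _ = PySem.Chars.endswith (sentence.toList.take (sentence.toList.length - pfx.toList.length)) u.toList := key
      _ = _ := by rw [← hslice]; simp
  · rw [Bool.eq_false_iff.mpr hp]
    simp only [Bool.not_false, if_true]
    have hfalse : ∀ u : String, PySem.Chars.endswith sentence.toList (u.toList ++ pfx.toList) = false :=
      fun u => endswith_append_false sentence.toList u.toList pfx.toList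
        (fun hc => hp (by simpa using (PySem.Chars.endswith_iff _ _).mpr hc))
    rw [PySem.List.foldl_congr_mem str_array _ (fun acc _ => acc) acc ?_]
    · exact PySem.List.foldl_ignore ..
    · intro a u _
      simp [hfalse u]

-- ===== VERDICT (by name: the statement is the Claim_ definition above) =====
theorem backward_match_spec : Claim_equal_backward_match := by
  intro sentence postfix_list str_array _
  unfold Spec_backward_match backward_match backward_match_alt
  match postfix_list with
  | none =>
      simp only [PySem.List.foldl_append_if_eq_filter, List.nil_append]
  | some pl =>
      apply PySem.List.foldl_congr_mem
      intro acc pfx _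
      exact inner_step_eq sentence pfx str_array acc
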